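-- pv_equiv track=rewrite | github.com/MrBrantCode/unitest_baseline | mut_generate/mist_train_cf/cf_74858/solution.py | reverse_and_check_anagram
-- ===== SOURCE A (Python) =====
-- def reverse_and_check_anagram(word):
--     # Reverse the word
--     reversed_word = word[::-1]
--
--     # Create frequency distribution of characters in the original and reversed word
--     original_freq = {}
--     for char in word:
--         if char in original_freq:
--             original_freq[char] += 1
--         else:
--             original_freq[char] = 1
--
--     reversed_freq = {}
--     for char in reversed_word:
--         if char in reversed_freq:
--             reversed_freq[char] += 1
--         else:
--             reversed_freq[char] = 1
--
--     # Check if the frequency distributions are the same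
--     is_anagram = original_freq == reversed_freq
--
--     return reversed_word, is_anagram
-- ===== SOURCE B (Python) =====
-- def reverse_and_check_anagram(word):
--     # Same task, sort-and-compare anagram test instead of two frequency dicts.
--     reversed_word = word[::-1]
--     is_anagram = sorted(word) == sorted(reversed_word)
--     return reversed_word, is_anagram
-- ===== Notes on version B (the rewrite author's own statement) =====
-- stated objective: simpler
-- what changed: Replaces the two hand-built character-frequency dicts and the dict comparison with a single sort-and-compare anagram test (sorted(word) == sorted(reversed_word)).
import Mathlib
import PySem

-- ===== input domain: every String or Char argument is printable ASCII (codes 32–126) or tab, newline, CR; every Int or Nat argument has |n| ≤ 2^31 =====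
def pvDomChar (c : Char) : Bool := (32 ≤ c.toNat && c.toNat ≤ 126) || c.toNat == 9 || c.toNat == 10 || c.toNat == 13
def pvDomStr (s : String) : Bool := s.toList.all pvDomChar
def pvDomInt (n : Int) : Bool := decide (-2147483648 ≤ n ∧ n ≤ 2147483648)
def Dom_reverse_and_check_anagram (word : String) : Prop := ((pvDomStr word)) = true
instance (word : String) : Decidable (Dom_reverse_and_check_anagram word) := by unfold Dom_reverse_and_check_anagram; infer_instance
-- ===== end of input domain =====

-- B replaces A's two frequency-dict loops and dict comparison by a sort-and-compare anagram
-- test (objective: simpler); same return value on every input.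

-- ===== PORT A =====
-- A's two identical frequency loops: if char in d: d[char] += 1 else: d[char] = 1
def pvFreq (l : List Char) : PySem.Dict Char Int :=
  l.foldl (fun d c => if d.contains c then d.modify c 0 (· + 1) else d.insert c 1)
    PySem.Dict.empty

-- Hand-port of Python's order-insensitive dict '=='; exact because Dict keys are unique.
def pvDictEq (d1 d2 : PySem.Dict Char Int) : Bool :=
  d1.items.length == d2.items.length && d1.items.all (fun kv => d2.get? kv.1 == some kv.2)

def reverse_and_check_anagram (word : String) : String × Bool :=
  let reversed_word := (PySem.Str.slice? word none none (-1)).getD ""   -- step ≠ 0: never none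
  let original_freq := pvFreq word.toList
  let reversed_freq := pvFreq reversed_word.toList
  let is_anagram := pvDictEq original_freq reversed_freq
  (reversed_word, is_anagram)

-- ===== PORT B =====
def reverse_and_check_anagram_alt (word : String) : String × Bool :=
  let reversed_word := (PySem.Str.slice? word none none (-1)).getD ""   -- step ≠ 0: never none
  let is_anagram :=
    PySem.List.sorted word.toList (fun x => x) false
      == PySem.List.sorted reversed_word.toList (fun x => x) false
  (reversed_word, is_anagram)

-- ===== PRECONDITION & SPEC =====
def Spec_reverse_and_check_anagram (word : String) (out : String × Bool) : Prop := out = reverse_and_check_anagram_alt word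
instance (word : String) (out : String × Bool) : Decidable (Spec_reverse_and_check_anagram word out) := by unfold Spec_reverse_and_check_anagram; infer_instance

-- ===== CLAIM (what is proved, stated in full; the proofs are below) =====
def Claim_equal_reverse_and_check_anagram : Prop := ∀ (word : String), Dom_reverse_and_check_anagram word → Spec_reverse_and_check_anagram word (reverse_and_check_anagram word)

-- ===== LEMMAS AND PROOFS =====

-- On an absent key, Python's 'd[c] = 1' is 'd[c] = d.get(c, 0) + 1'.
lemma insert_one_eq_modify (d : PySem.Dict Char Int) (c : Char) (h : d.contains c = false) :
    d.insert c 1 = d.modify c 0 (· + 1) := by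
  simp [PySem.Dict.insert, PySem.Dict.modify, h, PySem.Dict.getD_of_not_contains]

-- A's frequency loop builds exactly Counter(l).
lemma pvFreq_eq_counter (l : List Char) : pvFreq l = PySem.Dict.counter l := by
  rw [PySem.Dict.counter_eq_foldl]
  unfold pvFreq
  generalize PySem.Dict.empty = d
  induction l generalizing d with
  | nil => rfl
  | cons c t ih =>
    simp only [List.foldl_cons]
    rcases hc : (d.contains c) with _ | _
    · rw [if_neg (by simp), insert_one_eq_modify d c hc]; exact ih _
    · rw [if_pos (by simp)]; exact ih _

lemma set_ofList_reverse_length (l : List Char) :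
    (PySem.Set.ofList l.reverse).length = (PySem.Set.ofList l).length :=
  ((List.perm_ext_iff_of_nodup (PySem.Set.nodup_ofList _) (PySem.Set.nodup_ofList _)).2
    (by intro x; simp [PySem.Set.mem_ofList])).length_eq

lemma pvDictEq_counter_reverse (l : List Char) :
    pvDictEq (PySem.Dict.counter l) (PySem.Dict.counter l.reverse) = true := by
  unfold pvDictEq
  apply Bool.and_eq_true_iff.2
  constructor
  · simp [PySem.Dict.items_counter, set_ofList_reverse_length]
  · rw [List.all_eq_true]
    intro kv hkv
    rw [PySem.Dict.items_counter] at hkv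
    rcases List.mem_map.1 hkv with ⟨k, hk, rfl⟩
    have hmem : (k, (l.reverse.count k : Int)) ∈ (PySem.Dict.counter l.reverse).items := by
      rw [PySem.Dict.items_counter]
      exact List.mem_map.2 ⟨k, by simp [PySem.Set.mem_ofList]; exact (PySem.Set.mem_ofList _ _).1 hk, rfl⟩
    have := (PySem.Dict.get?_eq_some_iff_mem_items _ _ _ (PySem.Dict.nodup_keys_counter _)).2 hmem
    simp [this, List.count_reverse]

lemma sorted_reverse_eq (l : List Char) :
    PySem.List.sorted l.reverse (fun x => x) false = PySem.List.sorted l (fun x => x) false :=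
  PySem.List.sorted_eq_sorted_of_perm _ _ _ (fun _ _ h => h) (List.reverse_perm l)

-- ===== VERDICT (by name: the statement is the Claim_ definition above) =====
theorem reverse_and_check_anagram_spec : Claim_equal_reverse_and_check_anagram := by
  intro word _
  unfold Spec_reverse_and_check_anagram reverse_and_check_anagram reverse_and_check_anagram_alt
  rw [PySem.Str.slice?_none_none_neg_one]
  simp only [Option.getD_some]
  refine Prod.ext rfl ?_
  have hrev : (String.ofList word.toList.reverse).toList = word.toList.reverse := by
    simp [String.toList_ofList]
  simp only [hrev, pvFreq_eq_counter, pvDictEq_counter_reverse, sorted_reverse_eq, beq_self_eq_true]
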